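-- pv_equiv track=rewrite | github.com/tjpilant/idse-orchestrator | src/idse_orchestrator/file_view_generator.py | _resolve_blueprint_section
-- ===== SOURCE A (Python) =====
-- def _resolve_blueprint_section(claim_text: str, classification: str) -> str:
--     lowered = claim_text.lower()
--     if any(token in lowered for token in ["documentation os", "purpose", "intent-driven systems engineering"]):
--         return "## Purpose"
--     if classification == "boundary" or any(token in lowered for token in ["in scope", "out of scope", "boundary"]):
--         return "## System Boundaries"
--     if classification == "ownership_rule" or any(token in lowered for token in ["owner", "ownership", "collaborator", "stakeholder"]):
--         return "## Stakeholders"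
--     if any(token in lowered for token in ["architecture", "component", "interface", "data ownership"]):
--         return "## High-Level Architecture"
--     if classification == "invariant":
--         return "## Core Invariants"
--     return "## Constraints & Risks"
-- ===== SOURCE B (Python) =====
-- _HEADERS = [
--     "## Purpose",
--     "## System Boundaries",
--     "## Stakeholders",
--     "## High-Level Architecture",
--     "## Core Invariants",
--     "## Constraints & Risks",
-- ]
--
-- _TOKEN_PRIORITY = {
--     "documentation os": 0, "purpose": 0, "intent-driven systems engineering": 0,
--     "in scope": 1, "out of scope": 1, "boundary": 1,
--     "owner": 2, "ownership": 2, "collaborator": 2, "stakeholder": 2,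
--     "architecture": 3, "component": 3, "interface": 3, "data ownership": 3,
-- }
--
-- _CLS_PRIORITY = {"boundary": 1, "ownership_rule": 2, "invariant": 4}
--
--
-- def _resolve_blueprint_section(claim_text: str, classification: str) -> str:
--     lowered = claim_text.lower()
--     best = min((p for t, p in _TOKEN_PRIORITY.items() if t in lowered),
--                default=len(_HEADERS) - 1)
--     best = min(best, _CLS_PRIORITY.get(classification, len(_HEADERS) - 1))
--     return _HEADERS[best]
-- ===== Notes on version B (the rewrite author's own statement) =====
-- stated objective: alternative
-- what changed: Replaced the cascade of early-return if branches by a numeric minimization: every token and classification is mapped to a priority number in a flat dictionary, the minimum matched priority is computed (no short-circuiting rule scan), and that number indexes a header table.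
import Mathlib
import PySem

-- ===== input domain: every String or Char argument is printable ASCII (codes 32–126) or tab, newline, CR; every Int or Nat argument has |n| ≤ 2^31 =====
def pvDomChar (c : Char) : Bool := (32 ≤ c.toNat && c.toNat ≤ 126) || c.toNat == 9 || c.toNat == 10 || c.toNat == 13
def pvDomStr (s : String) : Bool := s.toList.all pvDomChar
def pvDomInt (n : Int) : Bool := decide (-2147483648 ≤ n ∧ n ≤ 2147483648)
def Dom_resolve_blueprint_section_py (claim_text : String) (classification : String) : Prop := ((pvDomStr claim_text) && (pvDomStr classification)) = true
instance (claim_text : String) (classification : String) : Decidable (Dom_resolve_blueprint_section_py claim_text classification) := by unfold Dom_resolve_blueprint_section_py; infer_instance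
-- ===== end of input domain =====

-- Header: B replaces A's cascade of early-return branches by a numeric minimization over a
-- flat token→priority map (plus a classification→priority map), indexing a header table
-- (objective: alternative).

-- ===== PORT A =====
def resolve_blueprint_section_py (claim_text : String) (classification : String) : String :=
  let lowered := PySem.Str.lower claim_text
  if ["documentation os", "purpose", "intent-driven systems engineering"].any
      (fun token => PySem.Str.isIn token lowered) then "## Purpose"
  else if classification == "boundary" || ["in scope", "out of scope", "boundary"].any
      (fun token => PySem.Str.isIn token lowered) then "## System Boundaries"
  else if classification == "ownership_rule" || ["owner", "ownership", "collaborator", "stakeholder"].any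
      (fun token => PySem.Str.isIn token lowered) then "## Stakeholders"
  else if ["architecture", "component", "interface", "data ownership"].any
      (fun token => PySem.Str.isIn token lowered) then "## High-Level Architecture"
  else if classification == "invariant" then "## Core Invariants"
  else "## Constraints & Risks"

-- ===== PORT B =====
-- the static tables from Source B
def pvHeaders : List String :=
  ["## Purpose", "## System Boundaries", "## Stakeholders",
   "## High-Level Architecture", "## Core Invariants", "## Constraints & Risks"]

def pvTokenPriority : List (String × Nat) :=
  [("documentation os", 0), ("purpose", 0), ("intent-driven systems engineering", 0),
   ("in scope", 1), ("out of scope", 1), ("boundary", 1),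
   ("owner", 2), ("ownership", 2), ("collaborator", 2), ("stakeholder", 2),
   ("architecture", 3), ("component", 3), ("interface", 3), ("data ownership", 3)]

def pvClsPriority : List (String × Nat) :=
  [("boundary", 1), ("ownership_rule", 2), ("invariant", 4)]

def resolve_blueprint_section_py_alt (claim_text : String) (classification : String) : String :=
  let lowered := PySem.Str.lower claim_text
  -- min over the matched token priorities, default = len(_HEADERS)-1, as a fold
  let best0 := pvTokenPriority.foldl
    (fun acc tp => if PySem.Str.isIn tp.1 lowered then min acc tp.2 else acc)
    (pvHeaders.length - 1)
  let best := min best0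
    (((pvClsPriority.find? (fun cp => cp.1 == classification)).map (·.2)).getD (pvHeaders.length - 1))
  pvHeaders.getD best "## Constraints & Risks"

-- ===== PRECONDITION & SPEC =====
def Spec_resolve_blueprint_section_py (claim_text : String) (classification : String) (out : String) : Prop := out = resolve_blueprint_section_py_alt claim_text classification
instance (claim_text : String) (classification : String) (out : String) : Decidable (Spec_resolve_blueprint_section_py claim_text classification out) := by unfold Spec_resolve_blueprint_section_py; infer_instance

-- ===== CLAIM (what is proved, stated in full; the proofs are below) =====
def Claim_equal_resolve_blueprint_section_py : Prop := ∀ (claim_text : String) (classification : String), Dom_resolve_blueprint_section_py claim_text classification → Spec_resolve_blueprint_section_py claim_text classification (resolve_blueprint_section_py claim_text classification)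

-- ===== LEMMAS AND PROOFS =====

-- folding min over a constant-priority token group = one test of the group's `any`
theorem pv_foldmin_group (lowered : String) (ts : List String) (p : Nat) (acc : Nat) :
    (ts.map (fun t => (t, p))).foldl
      (fun acc tp => if PySem.Str.isIn tp.1 lowered then min acc tp.2 else acc) acc
    = if ts.any (fun t => PySem.Str.isIn t lowered) then min acc p else acc := by
  induction ts generalizing acc with
  | nil => simp
  | cons h t ih =>
    rw [List.map_cons, List.foldl_cons, List.any_cons, ih]
    cases hh : PySem.Str.isIn h lowered <;>
      cases ht : t.any (fun t => PySem.Str.isIn t lowered) <;>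
        simp only [Bool.true_or, Bool.false_or, Bool.or_false] <;> split_ifs <;> omega

-- ===== VERDICT (by name: the statement is the Claim_ definition above) =====
theorem resolve_blueprint_section_py_spec : Claim_equal_resolve_blueprint_section_py := by
  intro claim_text classification _
  unfold Spec_resolve_blueprint_section_py resolve_blueprint_section_py resolve_blueprint_section_py_alt
  rw [show pvTokenPriority
      = (["documentation os", "purpose", "intent-driven systems engineering"].map (fun t => (t, 0)))
        ++ (["in scope", "out of scope", "boundary"].map (fun t => (t, 1)))
        ++ (["owner", "ownership", "collaborator", "stakeholder"].map (fun t => (t, 2)))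
        ++ (["architecture", "component", "interface", "data ownership"].map (fun t => (t, 3))) from rfl]
  simp only [List.foldl_append, pv_foldmin_group]
  unfold pvClsPriority
  simp only [List.find?]
  rw [show ("boundary" == classification) = (classification == "boundary") from BEq.comm,
    show ("ownership_rule" == classification) = (classification == "ownership_rule") from BEq.comm,
    show ("invariant" == classification) = (classification == "invariant") from BEq.comm]
  generalize (["documentation os", "purpose", "intent-driven systems engineering"].any
      (fun t => PySem.Str.isIn t (PySem.Str.lower claim_text))) = g0
  generalize (["in scope", "out of scope", "boundary"].any
      (fun t => PySem.Str.isIn t (PySem.Str.lower claim_text))) = g1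
  generalize (["owner", "ownership", "collaborator", "stakeholder"].any
      (fun t => PySem.Str.isIn t (PySem.Str.lower claim_text))) = g2
  generalize (["architecture", "component", "interface", "data ownership"].any
      (fun t => PySem.Str.isIn t (PySem.Str.lower claim_text))) = g3
  generalize (classification == "boundary") = c1
  generalize (classification == "ownership_rule") = c2
  generalize (classification == "invariant") = c3
  cases g0 <;> cases g1 <;> cases g2 <;> cases g3 <;> cases c1 <;> cases c2 <;> cases c3 <;> rfl
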